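-- pv_equiv track=rewrite | github.com/mittalab/MarketAnalyser | analysis/option_metrics.py | aggregate_bucket
-- ===== SOURCE A (Python) =====
-- def aggregate_bucket(rows):
--     if not rows:
--         return {"oi": 0, "oi_change": 0}
--
--     oi = sum(r["oi"] for r in rows)
--     oi_chg = sum(r["oi_change"] for r in rows)
--
--     return {
--         "oi": oi,
--         "oi_change": oi_chg
--     }
-- ===== SOURCE B (Python) =====
-- def aggregate_bucket(rows):
--     if not rows:
--         return {"oi": 0, "oi_change": 0}
--     if len(rows) == 1:
--         r = rows[0]
--         return {"oi": r["oi"], "oi_change": r["oi_change"]}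
--     mid = len(rows) // 2
--     left = aggregate_bucket(rows[:mid])
--     right = aggregate_bucket(rows[mid:])
--     return {
--         "oi": left["oi"] + right["oi"],
--         "oi_change": left["oi_change"] + right["oi_change"],
--     }
-- ===== Notes on version B (the rewrite author's own statement) =====
-- stated objective: alternative
-- what changed: Replaces A's two linear generator-sum passes (one per field, behind an empty guard) with a divide-and-conquer recursion that splits the row list at its midpoint, aggregates each half, and merges the two partial buckets by fieldwise addition.
import Mathlib
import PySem

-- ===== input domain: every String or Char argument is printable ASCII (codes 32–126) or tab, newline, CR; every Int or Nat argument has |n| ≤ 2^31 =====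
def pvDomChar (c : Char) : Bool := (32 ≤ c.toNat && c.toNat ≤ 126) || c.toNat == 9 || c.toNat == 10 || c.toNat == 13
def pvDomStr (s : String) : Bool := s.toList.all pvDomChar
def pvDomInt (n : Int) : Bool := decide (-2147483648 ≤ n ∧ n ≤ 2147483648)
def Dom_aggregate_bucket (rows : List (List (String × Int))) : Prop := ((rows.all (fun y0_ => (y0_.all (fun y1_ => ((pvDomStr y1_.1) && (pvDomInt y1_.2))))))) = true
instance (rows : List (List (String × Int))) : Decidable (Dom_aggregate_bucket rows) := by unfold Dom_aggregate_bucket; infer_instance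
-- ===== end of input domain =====

-- B replaces A's two linear summing passes by a divide-and-conquer recursion that splits
-- the rows at the midpoint and merges the two partial buckets fieldwise (alternative).

-- ===== PORT A =====
-- r["k"]: first match in the association list; Pre_ guarantees the key is present,
-- so getD 0 is exact on the admitted inputs.
def aggregate_bucket (rows : List (List (String × Int))) : List (String × Int) :=
  if rows = [] then [("oi", 0), ("oi_change", 0)]
  else
    let oi := (rows.map (fun r => (List.lookup "oi" r).getD 0)).sum
    let oi_chg := (rows.map (fun r => (List.lookup "oi_change" r).getD 0)).sum
    [("oi", oi), ("oi_change", oi_chg)]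

-- ===== PORT B =====
-- rows[:mid] / rows[mid:] with 0 ≤ mid ≤ len are exactly List.take / List.drop
-- (PySem.List.slice_to / slice_from); rows[0] on the guarded nonempty list is headD;
-- left["oi"] etc. are first-match lookups, present by construction, so getD 0 is exact.
def aggregate_bucket_alt (rows : List (List (String × Int))) : List (String × Int) :=
  if rows = [] then [("oi", 0), ("oi_change", 0)]
  else if rows.length = 1 then
    let r := rows.headD []
    [("oi", (List.lookup "oi" r).getD 0), ("oi_change", (List.lookup "oi_change" r).getD 0)]
  else
    let mid := rows.length / 2
    let left := aggregate_bucket_alt (rows.take mid)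
    let right := aggregate_bucket_alt (rows.drop mid)
    [("oi", (List.lookup "oi" left).getD 0 + (List.lookup "oi" right).getD 0),
     ("oi_change", (List.lookup "oi_change" left).getD 0 + (List.lookup "oi_change" right).getD 0)]
termination_by rows.length
decreasing_by
  all_goals
    simp only [List.length_take, List.length_drop]
    rename_i hne h1
    have h0 : rows.length ≠ 0 := fun hz => hne (List.eq_nil_of_length_eq_zero hz)
    omega

-- ===== PRECONDITION & SPEC =====
-- Pre_ excludes exactly the rows missing the "oi" or "oi_change" key, on which both
-- Pythons raise KeyError.
def Pre_aggregate_bucket (rows : List (List (String × Int))) : Prop :=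
  (rows.all (fun r =>
    (List.lookup "oi" r).isSome && (List.lookup "oi_change" r).isSome)) = true
instance (rows : List (List (String × Int))) : Decidable (Pre_aggregate_bucket rows) := by
  unfold Pre_aggregate_bucket; infer_instance

def pvWitness_aggregate_bucket : (List (List (String × Int))) :=
  [[("oi", 1), ("oi_change", -2)], [("oi_change", 4), ("oi", 3), ("vol", 7)]]

def Spec_aggregate_bucket (rows : List (List (String × Int))) (out : List (String × Int)) : Prop := out = aggregate_bucket_alt rows
instance (rows : List (List (String × Int))) (out : List (String × Int)) : Decidable (Spec_aggregate_bucket rows out) := by unfold Spec_aggregate_bucket; infer_instance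

-- ===== CLAIM =====
def Claim_equal_aggregate_bucket : Prop := ∀ (rows : List (List (String × Int))), Dom_aggregate_bucket rows → Pre_aggregate_bucket rows → Spec_aggregate_bucket rows (aggregate_bucket rows)

-- ===== LEMMAS AND PROOFS =====

-- the field sum both ports compute
def sumKey (rows : List (List (String × Int))) (k : String) : Int :=
  (rows.map (fun r => (List.lookup k r).getD 0)).sum

lemma sumKey_split (rows : List (List (String × Int))) (k : String) (m : Nat) :
    sumKey rows k = sumKey (rows.take m) k + sumKey (rows.drop m) k := by
  conv_lhs => rw [← List.take_append_drop m rows]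
  simp [sumKey]

lemma alt_eq (rows : List (List (String × Int))) :
    aggregate_bucket_alt rows
      = [("oi", sumKey rows "oi"), ("oi_change", sumKey rows "oi_change")] := by
  induction rows using aggregate_bucket_alt.induct with
  | case1 => simp [aggregate_bucket_alt, sumKey]
  | case2 rows hne h1 =>
    rw [aggregate_bucket_alt]
    rw [if_neg hne, if_pos h1]
    obtain ⟨r, rest⟩ := List.exists_cons_of_ne_nil hne
    obtain ⟨t, ht⟩ := rest
    subst ht
    have : t = [] := by simpa using h1
    subst this
    simp [sumKey]
  | case3 rows hne h1 mid ihl ihr =>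
    rw [aggregate_bucket_alt]
    rw [if_neg hne, if_neg h1]
    simp only []
    rw [ihl, ihr]
    simp [List.lookup]
    exact ⟨(sumKey_split rows "oi" (rows.length / 2)).symm,
           (sumKey_split rows "oi_change" (rows.length / 2)).symm⟩

-- ===== VERDICT =====
theorem aggregate_bucket_spec : Claim_equal_aggregate_bucket := by
  intro rows _ _
  unfold Spec_aggregate_bucket
  rw [alt_eq]
  unfold aggregate_bucket
  by_cases h : rows = []
  · subst h; simp [sumKey]
  · rw [if_neg h]
    simp [sumKey]
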